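-- pv_equiv track=rewrite | github.com/tontyoutoure/XianQiWeb | engine/cli.py | _expand_hand_cards
-- ===== SOURCE A (Python) =====
-- from typing import Any, Callable
--
-- def _expand_hand_cards(hand: dict[str, Any]) -> list[str]:
--     cards: list[str] = []
--     for card_type, count in sorted(hand.items()):
--         card_count = int(count)
--         if card_count <= 0:
--             continue
--         cards.extend([str(card_type)] * card_count)
--     return cards
-- ===== SOURCE B (Python) =====
-- def _expand_hand_cards(hand):
--     # Insertion strategy: keep the output sorted at all times and splice each
--     # card's block into its place; no sort call anywhere.
--     cards = []
--     for card_type, count in hand.items():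
--         key = str(card_type)
--         n = int(count)
--         if n <= 0:
--             continue
--         i = 0
--         while i < len(cards) and cards[i] < key:
--             i += 1
--         cards[i:i] = [key] * n
--     return cards
-- ===== Notes on version B (the rewrite author's own statement) =====
-- stated objective: alternative
-- what changed: A sorts the dict items and then expands each group in order; B never calls sort: it maintains the output list as a sorted invariant and splices each card's repeated block into its correct position by a linear scan (insertion-sort by blocks).
import Mathlib
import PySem

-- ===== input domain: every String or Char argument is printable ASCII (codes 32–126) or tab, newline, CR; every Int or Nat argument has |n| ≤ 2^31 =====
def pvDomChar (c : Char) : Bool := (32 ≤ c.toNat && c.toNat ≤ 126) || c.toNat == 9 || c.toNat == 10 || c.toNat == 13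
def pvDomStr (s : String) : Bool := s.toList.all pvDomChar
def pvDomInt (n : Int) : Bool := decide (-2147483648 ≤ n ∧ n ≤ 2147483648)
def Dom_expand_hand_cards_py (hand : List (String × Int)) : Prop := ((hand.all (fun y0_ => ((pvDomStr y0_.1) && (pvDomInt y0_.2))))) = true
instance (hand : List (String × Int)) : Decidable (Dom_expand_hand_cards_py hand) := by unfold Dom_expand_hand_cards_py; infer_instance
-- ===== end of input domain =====

-- B never sorts: it keeps the output list sorted as an invariant and splices each
-- card's repeated block into place by a linear scan; same result, different algorithm.

-- ===== PORT A =====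
-- sorted(hand.items()) compares (key, value) tuples lexicographically → sorted2
def expand_hand_cards_py (hand : List (String × Int)) : List String :=
  (PySem.List.sorted2 (PySem.Dict.ofList hand).items (fun p => p.1) (fun p => p.2) false).foldl
    (fun cards p =>
      if p.2 ≤ 0 then cards
      else cards ++ PySem.List.pyRepeat [p.1] p.2) []

-- ===== PORT B =====
-- the 'i = 0; while i < len(cards) and cards[i] < key: i += 1' scan of Source B,
-- transliterated as the structural recursion over the scanned list
def pvAltIdx (cards : List String) (key : String) : Nat :=
  match cards with
  | [] => 0
  | c :: rest => if c < key then pvAltIdx rest key + 1 else 0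

def expand_hand_cards_py_alt (hand : List (String × Int)) : List String :=
  (PySem.Dict.ofList hand).items.foldl
    (fun cards p =>
      if p.2 ≤ 0 then cards
      else
        let i := pvAltIdx cards p.1
        -- cards[i:i] = [key] * n  (slice assignment = splice at index i)
        cards.take i ++ PySem.List.pyRepeat [p.1] p.2 ++ cards.drop i) []

-- ===== PRECONDITION & SPEC =====
def Spec_expand_hand_cards_py (hand : List (String × Int)) (out : List String) : Prop := out = expand_hand_cards_py_alt hand
instance (hand : List (String × Int)) (out : List String) : Decidable (Spec_expand_hand_cards_py hand out) := by unfold Spec_expand_hand_cards_py; infer_instance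

-- ===== CLAIM (what is proved, stated in full; the proofs are below) =====
def Claim_equal_expand_hand_cards_py : Prop := ∀ (hand : List (String × Int)), Dom_expand_hand_cards_py hand → Spec_expand_hand_cards_py hand (expand_hand_cards_py hand)

-- ===== LEMMAS AND PROOFS =====

-- one card expanded to its repetitions
def pvG (p : String × Int) : List String := List.replicate p.2.toNat p.1

-- Python's tuple '<' used by sorted(hand.items())
def pvLexlt (p q : String × Int) : Bool :=
  decide (p.1 < q.1) || (!decide (q.1 < p.1) && decide (p.2 < q.2))

theorem pvLexlt_asymm (p q : String × Int) (h : pvLexlt p q = true) : pvLexlt q p = false := by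
  simp only [pvLexlt, Bool.or_eq_true, Bool.and_eq_true, Bool.not_eq_true', decide_eq_true_eq,
    decide_eq_false_iff_not, Bool.or_eq_false_iff, Bool.and_eq_false_iff,
    Bool.not_eq_false'] at *
  rcases h with h | ⟨h1, h2⟩
  · exact ⟨lt_asymm h, Or.inl (by simpa using h)⟩
  · exact ⟨h1, Or.inr (by simp [lt_asymm h2])⟩

theorem pvLexlt_trans (p q r : String × Int) (h1 : pvLexlt p q = true) (h2 : pvLexlt q r = true) :
    pvLexlt p r = true := by
  simp only [pvLexlt, Bool.or_eq_true, Bool.and_eq_true, Bool.not_eq_true',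
    decide_eq_true_eq, decide_eq_false_iff_not] at *
  rcases h1 with h1 | ⟨h1a, h1b⟩ <;> rcases h2 with h2 | ⟨h2a, h2b⟩
  · exact Or.inl (lt_trans h1 h2)
  · exact Or.inl (lt_of_lt_of_le h1 (le_of_not_gt h2a))
  · exact Or.inl (lt_of_le_of_lt (le_of_not_gt h1a) h2)
  · exact Or.inr ⟨fun h => h2a (lt_of_lt_of_le h (le_of_not_gt h1a)), lt_trans h1b h2b⟩

-- the order maintained by the insertion sort: earlier element is not lex-greater
theorem pvPairwise_insertBy (x : String × Int) (ys : List (String × Int))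
    (h : ys.Pairwise (fun a b => pvLexlt b a = false)) :
    (PySem.List.insertBy pvLexlt x ys).Pairwise (fun a b => pvLexlt b a = false) := by
  induction ys with
  | nil => simp [PySem.List.insertBy]
  | cons y ys ih =>
    rw [List.pairwise_cons] at h
    by_cases hxy : pvLexlt x y = true
    · simp only [PySem.List.insertBy, hxy, if_true]
      refine List.Pairwise.cons ?_ (List.Pairwise.cons h.1 h.2)
      intro z hz
      rcases List.mem_cons.mp hz with rfl | hz
      · exact pvLexlt_asymm _ _ hxy
      · have hyz := h.1 z hz
        by_contra hzx
        have hzx' : pvLexlt z x = true := by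
          cases hh : pvLexlt z x with
          | false => exact absurd hh hzx
          | true => rfl
        have := pvLexlt_trans z x y hzx' hxy
        simp [this] at hyz
    · simp only [PySem.List.insertBy, hxy]
      refine List.Pairwise.cons ?_ (ih h.2)
      intro z hz
      rcases (PySem.List.mem_insertBy _ _ _ _).mp hz with rfl | hz
      · simpa using hxy
      · exact h.1 z hz

theorem pvPairwise_sorted2 (xs : List (String × Int)) :
    (PySem.List.sorted2 xs (fun p => p.1) (fun p => p.2) false).Pairwise
      (fun a b => pvLexlt b a = false) := by
  have key : ∀ (l : List (String × Int)) (acc : List (String × Int)),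
      acc.Pairwise (fun a b => pvLexlt b a = false) →
      (List.foldl (fun acc x => PySem.List.insertBy pvLexlt x acc) acc l).Pairwise
        (fun a b => pvLexlt b a = false) := by
    intro l
    induction l with
    | nil => intro acc h; exact h
    | cons x l ih =>
      intro acc h
      exact ih _ (pvPairwise_insertBy x acc h)
  exact key xs [] (by simp)

theorem pvPairwise_fst (xs : List (String × Int)) :
    (PySem.List.sorted2 xs (fun p => p.1) (fun p => p.2) false).Pairwise
      (fun a b => a.1 ≤ b.1) := by
  refine (pvPairwise_sorted2 xs).imp ?_
  intro a b h
  simp only [pvLexlt, Bool.or_eq_false_iff, decide_eq_false_iff_not] at h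
  exact le_of_not_gt h.1

theorem pvPairwise_flatMap (l : List (String × Int))
    (h : l.Pairwise (fun a b => a.1 ≤ b.1)) :
    (l.flatMap pvG).Pairwise (fun a b : String => a ≤ b) := by
  induction l with
  | nil => simp
  | cons p l ih =>
    rw [List.pairwise_cons] at h
    rw [List.flatMap_cons, List.pairwise_append]
    refine ⟨?_, ih h.2, ?_⟩
    · exact List.pairwise_replicate.mpr (Or.inr le_rfl)
    · intro a ha b hb
      have ha' : a = p.1 := (List.eq_of_mem_replicate ha)
      rcases List.mem_flatMap.mp hb with ⟨q, hq, hbq⟩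
      have hb' : b = q.1 := (List.eq_of_mem_replicate hbq)
      rw [ha', hb']
      exact h.1 q hq

-- A's loop body, normalised: skipping a non-positive count is appending the empty expansion
theorem pvStepA_eq :
    (fun (cards : List String) (p : String × Int) =>
        if p.2 ≤ 0 then cards else cards ++ PySem.List.pyRepeat [p.1] p.2)
      = fun cards p => cards ++ pvG p := by
  funext cards p
  by_cases h : p.2 ≤ 0
  · simp [h, pvG, Int.toNat_of_nonpos h]
  · simp [h, pvG, PySem.List.pyRepeat_singleton]

theorem pvA_eq (hand : List (String × Int)) :
    expand_hand_cards_py hand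
      = (PySem.List.sorted2 (PySem.Dict.ofList hand).items (fun p => p.1) (fun p => p.2) false).flatMap pvG := by
  unfold expand_hand_cards_py
  rw [pvStepA_eq, PySem.List.foldl_append_eq_flatMap]
  simp

-- B's scan index is the length of the '< key' prefix
theorem pvAltIdx_eq_takeWhile (cards : List String) (key : String) :
    pvAltIdx cards key = (cards.takeWhile (fun c => decide (c < key))).length := by
  induction cards with
  | nil => rfl
  | cons c rest ih =>
    by_cases h : c < key
    · rw [List.takeWhile_cons, if_pos (by simpa using h)]
      simp only [pvAltIdx, if_pos h, List.length_cons, ih]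
    · rw [List.takeWhile_cons, if_neg (by simpa using h)]
      simp only [pvAltIdx, if_neg h, List.length_nil]

-- in a sorted list every element of the dropWhile (< key) suffix is ≥ key
theorem pvDropWhile_ge (cards : List String) (key : String)
    (h : cards.Pairwise (fun a b : String => a ≤ b)) :
    ∀ b ∈ cards.dropWhile (fun c => decide (c < key)), key ≤ b := by
  induction cards with
  | nil => simp
  | cons c rest ih =>
    rw [List.pairwise_cons] at h
    by_cases hc : c < key
    · rw [List.dropWhile_cons, if_pos (by simpa using hc)]
      exact ih h.2
    · intro b hb
      rw [List.dropWhile_cons, if_neg (by simpa using hc)] at hb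
      rcases List.mem_cons.mp hb with rfl | hb
      · exact le_of_not_gt hc
      · exact le_trans (le_of_not_gt hc) (h.1 b hb)

-- B's step: preserves sortedness and is, up to permutation, appending the expansion
theorem pvStepB (cards : List String) (p : String × Int)
    (h : cards.Pairwise (fun a b : String => a ≤ b)) :
    ((if p.2 ≤ 0 then cards
      else cards.take (pvAltIdx cards p.1) ++ PySem.List.pyRepeat [p.1] p.2
             ++ cards.drop (pvAltIdx cards p.1)).Pairwise (fun a b : String => a ≤ b))
    ∧ (if p.2 ≤ 0 then cards
       else cards.take (pvAltIdx cards p.1) ++ PySem.List.pyRepeat [p.1] p.2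
             ++ cards.drop (pvAltIdx cards p.1)).Perm (cards ++ pvG p) := by
  by_cases hn : p.2 ≤ 0
  · simp only [if_pos hn]
    exact ⟨h, by simp [pvG, Int.toNat_of_nonpos hn]⟩
  · have htake : cards.take (pvAltIdx cards p.1) = cards.takeWhile (fun c => decide (c < p.1)) := by
      rw [pvAltIdx_eq_takeWhile]
      exact (List.prefix_iff_eq_take.mp (List.takeWhile_prefix _)).symm
    have hdrop : cards.drop (pvAltIdx cards p.1) = cards.dropWhile (fun c => decide (c < p.1)) := by
      have := List.take_append_drop (pvAltIdx cards p.1) cards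
      have h2 := List.takeWhile_append_dropWhile (p := fun c => decide (c < p.1)) (l := cards)
      rw [htake] at this
      have := this.trans h2.symm
      exact List.append_cancel_left this
    have hrep : PySem.List.pyRepeat [p.1] p.2 = List.replicate p.2.toNat p.1 :=
      PySem.List.pyRepeat_singleton _ _
    simp only [if_neg hn, htake, hdrop, hrep]
    constructor
    · rw [List.append_assoc, List.pairwise_append]
      refine ⟨(h.sublist (List.takeWhile_sublist _)), ?_, ?_⟩
      · rw [List.pairwise_append]
        refine ⟨List.pairwise_replicate.mpr (Or.inr le_rfl),
          h.sublist (List.dropWhile_sublist _), ?_⟩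
        intro a ha b hb
        have := List.eq_of_mem_replicate ha
        subst this
        exact pvDropWhile_ge cards p.1 h b hb
      · intro a ha b hb
        have ha' : a < p.1 := by
          have := List.mem_takeWhile_imp ha
          simpa using this
        rcases List.mem_append.mp hb with hb | hb
        · have := List.eq_of_mem_replicate hb
          subst this; exact le_of_lt ha'
        · exact le_trans (le_of_lt ha') (pvDropWhile_ge cards p.1 h b hb)
    · have : (cards.takeWhile (fun c => decide (c < p.1))
            ++ (List.replicate p.2.toNat p.1 ++ cards.dropWhile (fun c => decide (c < p.1)))).Perm
          (cards.takeWhile (fun c => decide (c < p.1))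
            ++ (cards.dropWhile (fun c => decide (c < p.1)) ++ List.replicate p.2.toNat p.1)) :=
        List.Perm.append_left _ (List.perm_append_comm)
      rw [List.append_assoc]
      refine this.trans ?_
      rw [← List.append_assoc, List.takeWhile_append_dropWhile]
      exact List.Perm.append_left _ (by simp [pvG])

-- B's fold: sorted output, permutation of the naive expansion
theorem pvB_inv (l : List (String × Int)) (acc : List String)
    (h : acc.Pairwise (fun a b : String => a ≤ b)) :
    ((l.foldl (fun cards p =>
        if p.2 ≤ 0 then cards
        else cards.take (pvAltIdx cards p.1) ++ PySem.List.pyRepeat [p.1] p.2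
               ++ cards.drop (pvAltIdx cards p.1)) acc).Pairwise (fun a b : String => a ≤ b))
    ∧ (l.foldl (fun cards p =>
        if p.2 ≤ 0 then cards
        else cards.take (pvAltIdx cards p.1) ++ PySem.List.pyRepeat [p.1] p.2
               ++ cards.drop (pvAltIdx cards p.1)) acc).Perm (acc ++ l.flatMap pvG) := by
  induction l generalizing acc with
  | nil => simpa using h
  | cons p l ih =>
    obtain ⟨hs, hp⟩ := pvStepB acc p h
    obtain ⟨ihs, ihp⟩ := ih _ hs
    refine ⟨by simpa using ihs, ?_⟩
    simp only [List.foldl_cons]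
    refine ihp.trans ?_
    refine (List.Perm.append_right _ hp).trans ?_
    simp [List.append_assoc]

theorem pvB_eq (hand : List (String × Int)) :
    (expand_hand_cards_py_alt hand).Pairwise (fun a b : String => a ≤ b)
    ∧ (expand_hand_cards_py_alt hand).Perm ((PySem.Dict.ofList hand).items.flatMap pvG) := by
  have := pvB_inv (PySem.Dict.ofList hand).items [] (by simp)
  unfold expand_hand_cards_py_alt
  simpa using this

-- ===== VERDICT (by name: the statement is the Claim_ definition above) =====
theorem expand_hand_cards_py_spec : Claim_equal_expand_hand_cards_py := by
  intro hand _
  show expand_hand_cards_py hand = expand_hand_cards_py_alt hand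
  obtain ⟨hbs, hbp⟩ := pvB_eq hand
  rw [pvA_eq]
  have has : ((PySem.List.sorted2 (PySem.Dict.ofList hand).items (fun p => p.1) (fun p => p.2) false).flatMap pvG).Pairwise
      (fun a b : String => a ≤ b) := pvPairwise_flatMap _ (pvPairwise_fst _)
  have hap : ((PySem.List.sorted2 (PySem.Dict.ofList hand).items (fun p => p.1) (fun p => p.2) false).flatMap pvG).Perm
      ((PySem.Dict.ofList hand).items.flatMap pvG) :=
    (PySem.List.sorted2_perm _ _ _ _).flatMap (fun a _ => List.Perm.refl _)
  exact List.Perm.eq_of_pairwise (fun a b _ _ h1 h2 => le_antisymm h1 h2) has hbs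
    (hap.trans hbp.symm)
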